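-- pv_equiv track=rewrite | github.com/williamwxz/LeetCode | Robinhood/karat.py | user_min_max_time
-- ===== SOURCE A (Python) =====
-- def user_min_max_time(logs: list):
--     res = {}
--     MAX = float('inf')
--     for time, user, _ in logs:
--         if user not in res:
--             res[user] = [MAX, -MAX]
--         res[user][0] = min(res[user][0], time)
--         res[user][1] = max(res[user][1], time)
--     return res
-- ===== SOURCE B (Python) =====
-- def user_min_max_time(logs: list):
--     groups = {}
--     for time, user, _ in logs:
--         groups[user] = groups.get(user, []) + [time]
--     return {user: [min(times), max(times)] for user, times in groups.items()}
-- ===== Notes on version B (the rewrite author's own statement) =====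
-- stated objective: simpler
-- what changed: B groups all login times per user in one pass and then reduces each group with min/max in a dict comprehension, instead of A's incremental running-min/max with a float('inf') sentinel.
import Mathlib
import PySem

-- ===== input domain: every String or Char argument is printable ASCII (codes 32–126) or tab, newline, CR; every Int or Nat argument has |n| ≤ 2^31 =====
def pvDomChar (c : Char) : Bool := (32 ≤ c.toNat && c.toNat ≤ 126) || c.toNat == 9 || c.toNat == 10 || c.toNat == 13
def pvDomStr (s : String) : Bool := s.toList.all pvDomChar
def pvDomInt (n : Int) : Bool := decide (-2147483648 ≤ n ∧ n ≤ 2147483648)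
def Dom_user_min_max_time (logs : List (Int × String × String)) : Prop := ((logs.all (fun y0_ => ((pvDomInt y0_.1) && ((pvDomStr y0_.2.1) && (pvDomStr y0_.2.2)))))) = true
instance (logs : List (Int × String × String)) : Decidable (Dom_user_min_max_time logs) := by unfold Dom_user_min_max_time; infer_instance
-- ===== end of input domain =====

-- B replaces A's incremental running-min/max (with a float('inf') sentinel) by a
-- collect-then-reduce: group each user's times in one pass, then map min/max over the groups.

-- ===== PORT A =====
-- A's `res[user] = [MAX, -MAX]` uses the float('inf') sentinel, which the two following
-- statements immediately overwrite with min(inf, time) = time and max(-inf, time) = time;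
-- the port performs exactly that collapsed first step (exact: the sentinel never survives
-- an iteration, and the returned dict contains only ints).
def user_min_max_time (logs : List (Int × String × String)) : List (String × List Int) :=
  (logs.foldl (fun res x =>
      if ¬ res.contains x.2.1 then
        res.insert x.2.1 [x.1, x.1]          -- first occurrence: [min(inf,t), max(-inf,t)] = [t, t]
      else
        let v := res.getD x.2.1 []
        res.insert x.2.1 [min (v.getD 0 0) x.1, max (v.getD 1 0) x.1])
    (PySem.Dict.empty)).items

-- ===== PORT B =====
-- groups[user] = groups.get(user, []) + [time]  →  insert (getD ++ [t]);
-- the final dict comprehension is the map over groups.items.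
def user_min_max_time_alt (logs : List (Int × String × String)) : List (String × List Int) :=
  let groups := logs.foldl (fun d x => d.insert x.2.1 (d.getD x.2.1 [] ++ [x.1]))
                  (PySem.Dict.empty : PySem.Dict String (List Int))
  groups.items.map (fun p =>
    (p.1, [(PySem.List.min? p.2 (fun y => y)).getD 0,   -- min(times); times is never empty,
           (PySem.List.max? p.2 (fun y => y)).getD 0])) -- so the default is never used

-- ===== PRECONDITION & SPEC =====
def Spec_user_min_max_time (logs : List (Int × String × String)) (out : List (String × List Int)) : Prop := out = user_min_max_time_alt logs
instance (logs : List (Int × String × String)) (out : List (String × List Int)) : Decidable (Spec_user_min_max_time logs out) := by unfold Spec_user_min_max_time; infer_instance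

-- ===== CLAIM (what is proved, stated in full; the proofs are below) =====
def Claim_equal_user_min_max_time : Prop := ∀ (logs : List (Int × String × String)), Dom_user_min_max_time logs → Spec_user_min_max_time logs (user_min_max_time logs)

-- ===== LEMMAS AND PROOFS =====

-- the reduction B applies to each group
def pvRed (ts : List Int) : List Int :=
  [(PySem.List.min? ts (fun y => y)).getD 0, (PySem.List.max? ts (fun y => y)).getD 0]

-- B's grouping dict, pushed through the reduction, as a dict
def pvMapD (d : PySem.Dict String (List Int)) : PySem.Dict String (List Int) :=
  PySem.Dict.mk (d.items.map (fun p => (p.1, pvRed p.2)))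

theorem pvMapD_get? (d : PySem.Dict String (List Int)) (u : String) :
    (pvMapD d).get? u = (d.get? u).map pvRed := by
  obtain ⟨l⟩ := d
  induction l with
  | nil => rfl
  | cons p rest ih =>
    show (PySem.Dict.mk ((p.1, pvRed p.2) :: rest.map _)).get? u = _
    rw [PySem.Dict.get?_mk_cons, PySem.Dict.get?_mk_cons]
    by_cases h : (p.1 == u) = true
    · simp [h]
    · simpa [h] using ih

theorem pvMapD_contains (d : PySem.Dict String (List Int)) (u : String) :
    (pvMapD d).contains u = d.contains u := by
  rw [PySem.Dict.contains_eq_isSome_get?, PySem.Dict.contains_eq_isSome_get?, pvMapD_get?]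
  cases d.get? u <;> rfl

theorem pvMapD_insert (d : PySem.Dict String (List Int)) (u : String) (w : List Int) :
    (pvMapD d).insert u (pvRed w) = pvMapD (d.insert u w) := by
  apply PySem.Dict.ext
  by_cases h : d.contains u
  · rw [PySem.Dict.items_insert_of_contains _ _ ((pvMapD_contains d u).trans h),
        pvMapD, pvMapD, PySem.Dict.items_insert_of_contains _ _ h]
    simp only [List.map_map]
    refine List.map_congr_left (fun p _ => ?_)
    by_cases hp : p.1 = u <;> simp [hp]
  · rw [PySem.Dict.items_insert_of_not_contains _ _ (by simp [pvMapD_contains, h]),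
        pvMapD, pvMapD, PySem.Dict.items_insert_of_not_contains _ _ (by simpa using h)]
    simp

theorem pvRed_append (x : Int) (r : List Int) (t : Int) :
    pvRed (x :: r ++ [t]) =
      [min ((pvRed (x :: r)).getD 0 0) t, max ((pvRed (x :: r)).getD 1 0) t] := by
  simp [pvRed, PySem.List.min?_id_cons, PySem.List.max?_id_cons, List.foldl_append]

-- the step of A applied to the reduced dict is the reduction of the step of B
theorem pvStep_commute (d : PySem.Dict String (List Int))
    (hne : ∀ p ∈ d.items, p.2 ≠ []) (x : Int × String × String) :
    (if ¬ (pvMapD d).contains x.2.1 then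
        (pvMapD d).insert x.2.1 [x.1, x.1]
      else
        let v := (pvMapD d).getD x.2.1 []
        (pvMapD d).insert x.2.1 [min (v.getD 0 0) x.1, max (v.getD 1 0) x.1]) =
      pvMapD (d.insert x.2.1 (d.getD x.2.1 [] ++ [x.1])) := by
  rw [pvMapD_contains]
  by_cases h : d.contains x.2.1 = true
  · rw [if_neg (by simp [h])]
    rcases hg : d.get? x.2.1 with _ | ts
    · rw [PySem.Dict.contains_eq_isSome_get?, hg] at h; simp at h
    have hmem : (x.2.1, ts) ∈ d.items := PySem.Dict.mem_items_of_get?_eq_some d hg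
    obtain ⟨y, r, rfl⟩ : ∃ y r, ts = y :: r := by
      cases ts with
      | nil => exact absurd rfl (hne _ hmem)
      | cons y r => exact ⟨y, r, rfl⟩
    have hD : d.getD x.2.1 [] = y :: r := PySem.Dict.getD_of_get?_eq_some d [] hg
    have hDm : (pvMapD d).getD x.2.1 [] = pvRed (y :: r) := by
      rw [PySem.Dict.getD_eq_get?_getD, pvMapD_get?, hg]; rfl
    rw [hD, hDm]
    show (pvMapD d).insert x.2.1
        [min ((pvRed (y :: r)).getD 0 0) x.1, max ((pvRed (y :: r)).getD 1 0) x.1] = _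
    rw [← pvRed_append, pvMapD_insert]
  · have hb : d.contains x.2.1 = false := by simpa using h
    have hD : d.getD x.2.1 [] = [] := PySem.Dict.getD_of_not_contains d [] hb
    rw [if_pos (by simp [hb]), hD, List.nil_append]
    have hr : pvRed [x.1] = [x.1, x.1] := rfl
    rw [← hr, pvMapD_insert]

-- B's step keeps every stored group nonempty
theorem pvStepB_nonempty (d : PySem.Dict String (List Int))
    (hne : ∀ p ∈ d.items, p.2 ≠ []) (x : Int × String × String) :
    ∀ p ∈ (d.insert x.2.1 (d.getD x.2.1 [] ++ [x.1])).items, p.2 ≠ [] := by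
  intro p hp
  rcases (PySem.Dict.mem_items_insert _ _ _ _).1 hp with rfl | ⟨hmem, _⟩
  · simp
  · exact hne _ hmem

-- main invariant: folding A's step from the reduced dict = reducing B's fold
theorem pvFold_eq (logs : List (Int × String × String)) :
    ∀ (d : PySem.Dict String (List Int)), (∀ p ∈ d.items, p.2 ≠ []) →
    logs.foldl (fun res x =>
        if ¬ res.contains x.2.1 then
          res.insert x.2.1 [x.1, x.1]
        else
          let v := res.getD x.2.1 []
          res.insert x.2.1 [min (v.getD 0 0) x.1, max (v.getD 1 0) x.1])
      (pvMapD d) =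
    pvMapD (logs.foldl (fun d x => d.insert x.2.1 (d.getD x.2.1 [] ++ [x.1])) d) := by
  induction logs with
  | nil => intro d _; rfl
  | cons x rest ih =>
    intro d hne
    simp only [List.foldl_cons]
    rw [pvStep_commute d hne x]
    exact ih _ (pvStepB_nonempty d hne x)

-- ===== VERDICT (by name: the statement is the Claim_ definition above) =====
theorem user_min_max_time_spec : Claim_equal_user_min_max_time := by
  intro logs _
  show user_min_max_time logs = user_min_max_time_alt logs
  unfold user_min_max_time user_min_max_time_alt
  have h := pvFold_eq logs PySem.Dict.empty (by intro p hp; simp [PySem.Dict.empty] at hp)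
  have hempty : pvMapD PySem.Dict.empty = PySem.Dict.empty := rfl
  rw [hempty] at h
  rw [h]
  rfl
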